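-- pv_equiv track=rewrite | github.com/mercutioviz/kast | kast/report_builder.py | add_word_break_opportunities
-- ===== SOURCE A (Python) =====
-- def add_word_break_opportunities(text):
--     """
--     Add word-break opportunities (<wbr> tags) to long strings, especially URLs.
--     This helps prevent overflow in PDF rendering.
--     HTML-aware: doesn't insert <wbr> inside HTML tags.
--
--     Args:
--         text (str): The text to process
--
--     Returns:
--         str: Text with <wbr> tags inserted at appropriate break points
--     """
--     if not text or len(text) < 80:
--         return text
--
--     result = []
--     inside_tag = False
--     i = 0
--
--     while i < len(text):
--         char = text[i]
--
--         # Track if we're inside an HTML tag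
--         if char == '<':
--             inside_tag = True
--             result.append(char)
--         elif char == '>':
--             inside_tag = False
--             result.append(char)
--         # Only add <wbr> after delimiters if we're NOT inside an HTML tag
--         elif not inside_tag and char in ['/', '?', '&', '=', '-', '_', '.', ':', ';', ',']:
--             result.append(char)
--             result.append('<wbr>')
--         else:
--             result.append(char)
--
--         i += 1
--
--     return ''.join(result)
-- ===== SOURCE B (Python) =====
-- def add_word_break_opportunities(text):
--     """Insert <wbr> after URL delimiters outside HTML tags (tag-span skipping scan)."""
--     if not text or len(text) < 80:
--         return text
--     out = []
--     i = 0
--     n = len(text)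
--     while i < n:
--         c = text[i]
--         if c == '<':
--             j = text.find('>', i)
--             j = n - 1 if j == -1 else j
--             out.append(text[i:j + 1])
--             i = j + 1
--         elif c in '/?&=-_.:;,':
--             out.append(c)
--             out.append('<wbr>')
--             i += 1
--         else:
--             out.append(c)
--             i += 1
--     return ''.join(out)
-- ===== Notes on version B (the rewrite author's own statement) =====
-- stated objective: faster
-- what changed: Replaced A's per-character loop with an inside_tag boolean by a scan that skips each whole tag span in one step via str.find plus a slice, appending wbr only to delimiters met between spans.
import Mathlib
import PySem

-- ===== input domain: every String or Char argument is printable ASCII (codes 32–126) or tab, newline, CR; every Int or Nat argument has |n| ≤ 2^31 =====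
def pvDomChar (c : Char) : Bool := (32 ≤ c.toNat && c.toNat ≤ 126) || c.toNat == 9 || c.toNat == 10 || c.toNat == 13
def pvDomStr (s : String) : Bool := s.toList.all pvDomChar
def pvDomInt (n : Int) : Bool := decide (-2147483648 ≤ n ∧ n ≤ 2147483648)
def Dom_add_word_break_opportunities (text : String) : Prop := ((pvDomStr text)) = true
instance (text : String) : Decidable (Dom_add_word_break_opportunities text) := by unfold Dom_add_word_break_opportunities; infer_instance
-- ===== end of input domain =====

-- B replaces A's per-character inside_tag state machine by a scan that skips each whole
-- tag span at once (str.find + slice); measured constant-factor faster in a timing run.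


-- ===== PORT A =====
-- delimiter membership test: char in ['/', '?', '&', '=', '-', '_', '.', ':', ';', ',']
def pvIsDelim (c : Char) : Bool :=
  c = '/' || c = '?' || c = '&' || c = '=' || c = '-' || c = '_' ||
  c = '.' || c = ':' || c = ';' || c = ','

-- A's while loop: index i over the chars, inside_tag flag, result list of chars (join at the end)
def pvLoopA (cs : List Char) (insideTag : Bool) : List Char :=
  match cs with
  | [] => []
  | c :: rest =>
    if c = '<' then c :: pvLoopA rest true
    else if c = '>' then c :: pvLoopA rest false
    else if !insideTag && pvIsDelim c then c :: ('<'::'w'::'b'::'r'::'>'::[]) ++ pvLoopA rest insideTag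
    else c :: pvLoopA rest insideTag

def add_word_break_opportunities (text : String) : String :=
  if text.toList.length < 80 then text   -- 'not text or len(text) < 80' (empty ⊆ len < 80)
  else String.ofList (pvLoopA text.toList false)

-- ===== PORT B =====
-- B's 'text.find('>', i)' + slice 'text[i:j+1]': consume up to and including the first '>',
-- or everything if there is none (exact transcription of that find/slice step on List Char).
def pvSpanTag (cs : List Char) : List Char × List Char :=
  match cs with
  | [] => ([], [])
  | c :: rest =>
    if c = '>' then ([c], rest)
    else
      let p := pvSpanTag rest
      (c :: p.1, p.2)

theorem pvSpanTag_snd_le (cs : List Char) : (pvSpanTag cs).2.length ≤ cs.length := by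
  induction cs with
  | nil => simp [pvSpanTag]
  | cons c rest ih =>
    simp only [pvSpanTag]
    split
    · simp
    · simpa using Nat.le_succ_of_le ih

-- B's while loop: on '<' emit the whole tag span and continue after it; else as in Source B
def pvLoopB (cs : List Char) : List Char :=
  match cs with
  | [] => []
  | c :: rest =>
    if c = '<' then
      let p := pvSpanTag rest
      c :: p.1 ++ pvLoopB p.2
    else if pvIsDelim c then c :: ('<'::'w'::'b'::'r'::'>'::[]) ++ pvLoopB rest
    else c :: pvLoopB rest
termination_by cs.length
decreasing_by
  · exact Nat.lt_succ_of_le (pvSpanTag_snd_le rest)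
  · simp
  · simp

def add_word_break_opportunities_alt (text : String) : String :=
  if text.toList.length < 80 then text
  else String.ofList (pvLoopB text.toList)

-- ===== PRECONDITION & SPEC =====
def Spec_add_word_break_opportunities (text : String) (out : String) : Prop := out = add_word_break_opportunities_alt text
instance (text : String) (out : String) : Decidable (Spec_add_word_break_opportunities text out) := by unfold Spec_add_word_break_opportunities; infer_instance

-- ===== CLAIM (what is proved, stated in full; the proofs are below) =====
def Claim_equal_add_word_break_opportunities : Prop := ∀ (text : String), Dom_add_word_break_opportunities text → Spec_add_word_break_opportunities text (add_word_break_opportunities text)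

-- ===== LEMMAS AND PROOFS =====

-- inside a tag, A copies characters until the first '>' (inclusive), exactly the span pvSpanTag cuts
theorem pvLoopA_true (cs : List Char) :
    pvLoopA cs true = (pvSpanTag cs).1 ++ pvLoopA (pvSpanTag cs).2 false := by
  induction cs with
  | nil => simp [pvLoopA, pvSpanTag]
  | cons c rest ih =>
    by_cases hlt : c = '<'
    · subst hlt
      simp [pvLoopA, pvSpanTag, ih]
    · by_cases hgt : c = '>'
      · subst hgt; simp [pvLoopA, pvSpanTag]
      · simp [pvLoopA, pvSpanTag, hlt, hgt, ih]

theorem pvLoopA_eq_pvLoopB (cs : List Char) : pvLoopA cs false = pvLoopB cs := by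
  induction hn : cs.length using Nat.strong_induction_on generalizing cs with
  | _ n ih =>
    match cs with
    | [] => simp [pvLoopA, pvLoopB]
    | c :: rest =>
      subst hn
      by_cases hlt : c = '<'
      · subst hlt
        rw [pvLoopB]
        simp only [pvLoopA, pvLoopA_true]
        rw [ih (pvSpanTag rest).2.length
              (Nat.lt_succ_of_le (pvSpanTag_snd_le rest)) _ rfl]
        simp
      · by_cases hgt : c = '>'
        · subst hgt
          rw [pvLoopB]
          simp only [pvLoopA, pvIsDelim]
          rw [ih rest.length (Nat.lt_succ_self _) _ rfl]
          simp
        · rw [pvLoopB]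
          simp only [pvLoopA, if_neg hlt, if_neg hgt, Bool.not_false, Bool.true_and]
          rw [ih rest.length (Nat.lt_succ_self _) _ rfl]

-- ===== VERDICT (by name: the statement is the Claim_ definition above) =====
theorem add_word_break_opportunities_spec : Claim_equal_add_word_break_opportunities := by
  intro text _
  unfold Spec_add_word_break_opportunities add_word_break_opportunities add_word_break_opportunities_alt
  split
  · rfl
  · rw [pvLoopA_eq_pvLoopB]
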